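-- pv_equiv track=rewrite | github.com/antonis96/sodn-evaluator | evaluator/helpers.py | replace_dict_values
-- ===== SOURCE A (Python) =====
-- import itertools
--
-- def replace_dict_values(d, mode):
--     keys = list(d.keys())
--     dict_variants = []
--     # Loop through each possible combination of key replacements (1 key, 2 keys, ..., n keys)
--     for r in range(1, len(keys) + 1):
--         for key_subset in itertools.combinations(keys, r):
--             # Generate different versions of new_dict for each key
--             new_dict_options = [d.copy()]
--             for key in key_subset:
--                 if d[key] == '1':
--                     # Create new variants for '0'
--                     new_variants = []
--                     for variant in new_dict_options:
--                         variant_0 = variant.copy()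
--                         variant_0[key] = '0'
--                         new_variants.extend([variant_0])
--                     new_dict_options = new_variants
--                 elif d[key] == '0':
--                     # Create new variants for '1'
--                     new_variants = []
--                     for variant in new_dict_options:
--                         variant_1 = variant.copy()
--                         variant_1[key] = '1'
--                         new_variants.extend([variant_1])
--                     new_dict_options = new_variants
--
--             dict_variants.extend(new_dict_options)
--
--     return dict_variants
-- ===== SOURCE B (Python) =====
-- def replace_dict_values(d, mode):
--     # Bitmask enumeration: each non-empty variant corresponds to a mask over key
--     # positions (bit n-1-i <-> key i).  Masks sorted by (popcount, -mask) reproduce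
--     # the size-ascending, index-lexicographic order without building combinations.
--     items = list(d.items())
--     n = len(items)
--     masks = sorted(range(1, 1 << n), key=lambda m: (bin(m).count('1') << n) - m)
--     def flip(v):
--         return '0' if v == '1' else '1' if v == '0' else v
--     return [
--         {k: (flip(v) if (m >> (n - 1 - i)) & 1 else v) for i, (k, v) in enumerate(items)}
--         for m in masks
--     ]
-- ===== Notes on version B (the rewrite author's own statement) =====
-- stated objective: alternative
-- what changed: A enumerates itertools.combinations per size and builds each variant by a chain of full-dict copies mutated key by key; B never builds combinations: it enumerates subsets as integer bitmasks, sorts range(1, 2**n) by (popcount, -mask) to reproduce A's order, and reads each variant's values directly off the mask bits.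
import Mathlib
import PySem

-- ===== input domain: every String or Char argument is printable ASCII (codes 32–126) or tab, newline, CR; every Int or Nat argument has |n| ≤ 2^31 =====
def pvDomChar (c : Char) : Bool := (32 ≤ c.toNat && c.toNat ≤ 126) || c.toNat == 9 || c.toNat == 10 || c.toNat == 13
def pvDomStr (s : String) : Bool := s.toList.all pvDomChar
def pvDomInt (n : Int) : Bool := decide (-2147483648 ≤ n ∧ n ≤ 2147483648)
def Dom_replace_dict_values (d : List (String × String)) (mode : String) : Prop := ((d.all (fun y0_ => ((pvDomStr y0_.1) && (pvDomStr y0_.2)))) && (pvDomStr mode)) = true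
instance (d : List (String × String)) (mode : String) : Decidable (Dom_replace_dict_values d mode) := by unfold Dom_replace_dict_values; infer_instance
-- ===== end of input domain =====

-- B replaces A's combinations-driven copy-mutate enumeration by pure bitmask arithmetic:
-- it sorts the masks 1..2^n-1 by (popcount, -mask) and reads each variant's values off
-- the bits; this file proves the return values equal on Dom (alternative algorithm).


-- ===== PORT A =====
-- literal port of A; d[key] is ported as getD key "" which is exact here because every
-- looked-up key comes from d.keys (so it is present in d)
def replace_dict_values (d : List (String × String)) (mode : String) : List (List (String × String)) :=
  let dd := PySem.Dict.ofList d
  let keys := dd.keys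
  let dict_variants : List (PySem.Dict String String) :=
    (PySem.List.pyRange 1 ((keys.length : Int) + 1) 1).foldl (fun dv r =>
      (PySem.List.combinations keys r.toNat).foldl (fun dv key_subset =>
        let new_dict_options :=
          key_subset.foldl (fun opts key =>
            if dd.getD key "" == "1" then
              opts.foldl (fun nv variant => nv ++ [variant.insert key "0"]) []
            else if dd.getD key "" == "0" then
              opts.foldl (fun nv variant => nv ++ [variant.insert key "1"]) []
            else opts) [dd]
        dv ++ new_dict_options) dv) []
  dict_variants.map (·.items)

-- ===== PORT B =====
-- Source B's flip(v)
def pvFlip (v : String) : String := if v == "1" then "0" else if v == "0" then "1" else v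

-- hand port of bin(m).count('1') (the number of 1 bits of m), exact for m ≥ 0
def pvPopcount : Nat → Nat
  | 0 => 0
  | (m+1) => (m+1) % 2 + pvPopcount ((m+1)/2)

-- literal port of Source B: sorted(range(1, 1 << n), key=lambda m: (bin(m).count('1') << n) - m)
-- (1 << n and << n ported as * 2^n, exact for n ≥ 0), then one comprehension over
-- enumerate(items) per mask; (m >> (n-1-i)) & 1 on these non-negative operands is
-- m.toNat >>> (n-1-i) &&& 1
def replace_dict_values_alt (d : List (String × String)) (mode : String) : List (List (String × String)) :=
  let items := (PySem.Dict.ofList d).items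
  let n := items.length
  let masks := PySem.List.sorted (PySem.List.pyRange 1 ((2:Int)^n) 1)
    (fun m => (pvPopcount m.toNat : Int) * (2:Int)^n - m)
  masks.map (fun m =>
    (PySem.List.enumerate items 0).map (fun q =>
      (q.2.1, if (m.toNat >>> (n - 1 - q.1.toNat)) &&& 1 == 1 then pvFlip q.2.2 else q.2.2)))

-- ===== PRECONDITION & SPEC =====
def Spec_replace_dict_values (d : List (String × String)) (mode : String) (out : List (List (String × String))) : Prop := out = replace_dict_values_alt d mode
instance (d : List (String × String)) (mode : String) (out : List (List (String × String))) : Decidable (Spec_replace_dict_values d mode out) := by unfold Spec_replace_dict_values; infer_instance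

-- ===== CLAIM (what is proved, stated in full; the proofs are below) =====
def Claim_equal_replace_dict_values : Prop := ∀ (d : List (String × String)) (mode : String), Dom_replace_dict_values d mode → Spec_replace_dict_values d mode (replace_dict_values d mode)

-- ===== LEMMAS AND PROOFS =====

-- A's step on a single variant, once the always-singleton options list is collapsed
def pvStepA (dd acc : PySem.Dict String String) (k : String) : PySem.Dict String String :=
  if dd.getD k "" == "1" then acc.insert k "0"
  else if dd.getD k "" == "0" then acc.insert k "1"
  else acc

-- the mask encoding an index subset (bit n-1-i set iff index i chosen)
def pvMask (n : Nat) (I : List Nat) : Nat := (I.map (fun i => 2^(n-1-i))).sum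

-- A's options list is always a singleton
theorem pvOptions_singleton (dd : PySem.Dict String String) (sub : List String) :
    ∀ v : PySem.Dict String String,
      sub.foldl (fun opts key =>
        if dd.getD key "" == "1" then
          opts.foldl (fun nv variant => nv ++ [variant.insert key "0"]) []
        else if dd.getD key "" == "0" then
          opts.foldl (fun nv variant => nv ++ [variant.insert key "1"]) []
        else opts) [v]
      = [sub.foldl (pvStepA dd) v] := by
  induction sub with
  | nil => intro v; rfl
  | cons k rest ih =>
    intro v
    have hstep :
        (if (dd.getD k "" == "1") = true then
          List.foldl (fun nv (variant : PySem.Dict String String) => nv ++ [variant.insert k "0"])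
            ([] ++ [v.insert k "0"]) ([] : List (PySem.Dict String String))
        else if (dd.getD k "" == "0") = true then
          List.foldl (fun nv (variant : PySem.Dict String String) => nv ++ [variant.insert k "1"])
            ([] ++ [v.insert k "1"]) ([] : List (PySem.Dict String String))
        else [v]) = [pvStepA dd v k] := by
      unfold pvStepA
      by_cases h1 : dd.getD k "" == "1"
      · simp [h1]
      · by_cases h0 : dd.getD k "" == "0"
        · simp [h1, h0]
        · simp [h1, h0]
    simp only [List.foldl_cons]
    rw [hstep]
    exact ih _

theorem pvMask_lt (n : Nat) : ∀ (I : List Nat), I.Pairwise (· < ·) →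
    (∀ j ∈ I, j < n) → ∀ (lo : Nat), (∀ j ∈ I, lo ≤ j) → pvMask n I < 2^(n-lo) := by
  intro I
  induction I with
  | nil => intro _ _ lo _; simp [pvMask]
  | cons j rest ih =>
    intro hp hn lo hlo
    have hjr : ∀ x ∈ rest, j < x := (List.pairwise_cons.mp hp).1
    have hrest : pvMask n rest < 2^(n-(j+1)) :=
      ih (List.pairwise_cons.mp hp).2 (fun x hx => hn x (by simp [hx])) (j+1) (fun x hx => hjr x hx)
    have hj : j < n := hn j (by simp)
    have hlj : lo ≤ j := hlo j (by simp)
    have hM : pvMask n (j :: rest) = 2^(n-1-j) + pvMask n rest := by simp [pvMask]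
    have he : n-(j+1) = n-1-j := by omega
    rw [he] at hrest
    have hsum : pvMask n (j :: rest) < 2^(n-j) := by
      rw [hM]
      have : (2:Nat)^(n-1-j) + 2^(n-1-j) = 2^(n-j) := by
        rw [← two_mul, ← pow_succ']
        congr 1
        omega
      omega
    calc pvMask n (j :: rest) < 2^(n-j) := hsum
      _ ≤ 2^(n-lo) := Nat.pow_le_pow_right (by norm_num) (by omega)

theorem pvPopcount_eq (m : Nat) : pvPopcount m = m % 2 + pvPopcount (m / 2) := by
  cases m with
  | zero => simp [pvPopcount]
  | succ k => simp [pvPopcount]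

theorem pvPopcount_two_pow_add (e : Nat) : ∀ x < 2^e, pvPopcount (2^e + x) = 1 + pvPopcount x := by
  induction e with
  | zero =>
    intro x hx
    interval_cases x
    rw [show (2:Nat)^0 + 0 = 1 by norm_num, pvPopcount_eq 1]
  | succ e ih =>
    intro x hx
    have h2 : (2^(e+1) + x) / 2 = 2^e + x / 2 := by rw [pow_succ]; omega
    have hm : (2^(e+1) + x) % 2 = x % 2 := by rw [pow_succ]; omega
    have hx2 : x / 2 < 2^e := by rw [pow_succ] at hx; omega
    rw [pvPopcount_eq (2^(e+1)+x), h2, hm, ih _ hx2, pvPopcount_eq x]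
    ring

theorem pvPopcount_mask (n : Nat) : ∀ (I : List Nat), I.Pairwise (· < ·) →
    (∀ j ∈ I, j < n) → pvPopcount (pvMask n I) = I.length := by
  intro I
  induction I with
  | nil => simp [pvMask, pvPopcount]
  | cons j rest ih =>
    intro hp hn
    have hjr : ∀ x ∈ rest, j < x := (List.pairwise_cons.mp hp).1
    have hrest : pvMask n rest < 2^(n-(j+1)) :=
      pvMask_lt n rest (List.pairwise_cons.mp hp).2 (fun x hx => hn x (by simp [hx])) (j+1) hjr
    have hj : j < n := hn j (by simp)
    have he : n-(j+1) = n-1-j := by omega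
    rw [he] at hrest
    have hM : pvMask n (j :: rest) = 2^(n-1-j) + pvMask n rest := by simp [pvMask]
    rw [hM, pvPopcount_two_pow_add _ _ hrest, ih (List.pairwise_cons.mp hp).2 (fun x hx => hn x (by simp [hx]))]
    simp [Nat.add_comm]

theorem pvMask_bit (n : Nat) : ∀ (I : List Nat), I.Pairwise (· < ·) → (∀ j ∈ I, j < n) →
    ∀ i < n, ((pvMask n I >>> (n-1-i)) &&& 1 = 1 ↔ i ∈ I) := by
  intro I
  induction I with
  | nil =>
    intro _ _ i hi
    simp [pvMask, Nat.shiftRight_eq_div_pow]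
  | cons j rest ih =>
    intro hp hn i hi
    have hjr : ∀ x ∈ rest, j < x := (List.pairwise_cons.mp hp).1
    have hj : j < n := hn j (by simp)
    have hrest : pvMask n rest < 2^(n-1-j) := by
      have := pvMask_lt n rest (List.pairwise_cons.mp hp).2 (fun x hx => hn x (by simp [hx])) (j+1) hjr
      rwa [show n-(j+1) = n-1-j by omega] at this
    have hM : pvMask n (j :: rest) = 2^(n-1-j) + pvMask n rest := by simp [pvMask]
    rw [Nat.and_one_is_mod, Nat.shiftRight_eq_div_pow, hM]
    rcases lt_trichotomy i j with hij | hij | hij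
    · -- i < j: exponent n-1-i > n-1-j, whole mask < 2^(n-1-i), bit 0; i not in list
      have hlt : 2^(n-1-j) + pvMask n rest < 2^(n-1-i) := by
        have h1 : (2:Nat)^(n-1-j) + 2^(n-1-j) = 2^(n-1-j+1) := by
          rw [← two_mul, ← pow_succ']
        have h2 : (2:Nat)^(n-1-j+1) ≤ 2^(n-1-i) := Nat.pow_le_pow_right (by norm_num) (by omega)
        omega
      have hdiv : (2^(n-1-j) + pvMask n rest) / 2^(n-1-i) = 0 := Nat.div_eq_of_lt hlt
      rw [hdiv]
      simp only [Nat.zero_mod]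
      constructor
      · omega
      · intro hmem
        rcases List.mem_cons.mp hmem with h | h
        · omega
        · exact absurd (hjr i h) (by omega)
    · -- i = j: (2^e + x)/2^e = 1 + small, odd
      subst hij
      have hdiv : (2^(n-1-i) + pvMask n rest) / 2^(n-1-i) = 1 + pvMask n rest / 2^(n-1-i) := by
        rw [Nat.add_div_left _ (Nat.pow_pos (by norm_num))]
        omega
      rw [hdiv, Nat.div_eq_of_lt hrest]
      simp
    · -- i > j: 2^(n-1-j) contributes an even summand after the shift; bit comes from rest
      have hd : n-1-i < n-1-j := by omega
      have hpow : (2:Nat)^(n-1-j) = 2^((n-1-j)-(n-1-i)) * 2^(n-1-i) := by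
        rw [← pow_add]; congr 1; omega
      have hdiv : (2^(n-1-j) + pvMask n rest) / 2^(n-1-i)
          = pvMask n rest / 2^(n-1-i) + 2^((n-1-j)-(n-1-i)) := by
        rw [hpow, Nat.add_comm, Nat.add_mul_div_right _ _ (Nat.pow_pos (by norm_num))]
      rw [hdiv]
      have heven : (2:Nat)^((n-1-j)-(n-1-i)) = 2 * 2^((n-1-j)-(n-1-i)-1) := by
        rw [← pow_succ']; congr 1; omega
      have hmod : (pvMask n rest / 2^(n-1-i) + 2^((n-1-j)-(n-1-i))) % 2
          = (pvMask n rest / 2^(n-1-i)) % 2 := by omega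
      rw [hmod]
      have hih := ih (List.pairwise_cons.mp hp).2 (fun x hx => hn x (by simp [hx])) i hi
      rw [Nat.and_one_is_mod, Nat.shiftRight_eq_div_pow] at hih
      rw [hih]
      have : i ≠ j := by omega
      simp [this]

theorem pvComb_length {α : Type} : ∀ (r : Nat) (xs : List α),
    (PySem.List.combinations xs r).length = Nat.choose xs.length r
  | 0, xs => by simp [PySem.List.combinations_zero]
  | (r+1), [] => by simp [PySem.List.combinations_nil_succ]
  | (r+1), (x :: xs) => by
    rw [PySem.List.combinations_cons_succ]
    simp [pvComb_length r xs, pvComb_length (r+1) xs, Nat.choose_succ_succ']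

theorem pvComb_mask_pairwise (n : Nat) : ∀ (xs : List Nat) (r : Nat), xs.Pairwise (· < ·) →
    (∀ j ∈ xs, j < n) →
    (PySem.List.combinations xs r).Pairwise (fun a b => pvMask n b < pvMask n a) := by
  intro xs
  induction xs with
  | nil =>
    intro r _ _
    cases r with
    | zero => simp [PySem.List.combinations_zero]
    | succ r => simp [PySem.List.combinations_nil_succ]
  | cons x xs ih =>
    intro r hp hn
    cases r with
    | zero => simp [PySem.List.combinations_zero]
    | succ r =>
      rw [PySem.List.combinations_cons_succ, List.pairwise_append]
      have hxr : ∀ j ∈ xs, x < j := (List.pairwise_cons.mp hp).1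
      have hpx : xs.Pairwise (· < ·) := (List.pairwise_cons.mp hp).2
      have hnx : ∀ j ∈ xs, j < n := fun j hj => hn j (by simp [hj])
      refine ⟨?_, ih (r+1) hpx hnx, ?_⟩
      · rw [List.pairwise_map]
        have := ih r hpx hnx
        apply this.imp
        intro a b hab
        have h1 : pvMask n (x :: a) = 2^(n-1-x) + pvMask n a := by simp [pvMask]
        have h2 : pvMask n (x :: b) = 2^(n-1-x) + pvMask n b := by simp [pvMask]
        omega
      · intro a ha b hb
        obtain ⟨a', ha', rfl⟩ := List.mem_map.mp ha
        have hbs := PySem.List.sublist_of_mem_combinations hb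
        have hbp : b.Pairwise (· < ·) := hpx.sublist hbs
        have hbn : ∀ j ∈ b, j < n := fun j hj => hnx j (hbs.subset hj)
        have hblo : ∀ j ∈ b, x+1 ≤ j := fun j hj => hxr j (hbs.subset hj)
        have hblt : pvMask n b < 2^(n-(x+1)) := pvMask_lt n b hbp hbn (x+1) hblo
        have hxn : x < n := hn x (by simp)
        have : pvMask n (x :: a') = 2^(n-1-x) + pvMask n a' := by simp [pvMask]
        rw [show n-(x+1) = n-1-x by omega] at hblt
        omega

theorem pvSum_range (n : Nat) (f : Nat → Nat) :
    ((List.range n).map f).sum = ∑ i ∈ Finset.range n, f i := by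
  induction n with
  | zero => simp
  | succ k ih => rw [List.range_succ, Finset.sum_range_succ]; simp [ih]

theorem pvRange_eq_map (n : Nat) :
    PySem.List.pyRange 1 ((n:Int)+1) 1 = (List.range n).map (fun (k:Nat) => (k:Int)+1) := by
  apply List.ext_getElem?
  intro k
  rw [PySem.List.getElem?_pyRange_one, List.getElem?_map]
  by_cases hk : k < n
  · rw [if_pos (by omega), List.getElem?_range hk, Option.map_some]
    congr 1
    omega
  · rw [if_neg (by omega), List.getElem?_eq_none (by simpa using (by omega : n ≤ k)), Option.map_none]

-- the A-order mask list is exactly sorted(range(1, 2^n), key)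
theorem pvMasks_sorted (n : Nat) :
    PySem.List.sorted (PySem.List.pyRange 1 ((2:Int)^n) 1)
        (fun m => (pvPopcount m.toNat : Int) * (2:Int)^n - m)
      = (PySem.List.pyRange 1 ((n:Int)+1) 1).flatMap (fun r =>
          (PySem.List.combinations (List.range n) r.toNat).map (fun I => (pvMask n I : Int))) := by
  set key : Int → Int := fun m => (pvPopcount m.toNat : Int) * (2:Int)^n - m with hkey
  set M := (PySem.List.pyRange 1 ((n:Int)+1) 1).flatMap (fun r =>
          (PySem.List.combinations (List.range n) r.toNat).map (fun I => (pvMask n I : Int))) with hMdef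
  -- facts about the members of each block
  have hmem : ∀ (r : Int), r ∈ PySem.List.pyRange 1 ((n:Int)+1) 1 →
      ∀ I ∈ PySem.List.combinations (List.range n) r.toNat,
        I.Pairwise (· < ·) ∧ (∀ j ∈ I, j < n) ∧ I.length = r.toNat ∧
        1 ≤ pvMask n I ∧ pvMask n I < 2^n := by
    intro r hr I hI
    have hrb := (PySem.List.mem_pyRange_one).mp hr
    have hsub := PySem.List.sublist_of_mem_combinations hI
    have hlen := PySem.List.length_of_mem_combinations hI
    have hp : I.Pairwise (· < ·) := List.pairwise_lt_range.sublist hsub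
    have hlt : ∀ j ∈ I, j < n := fun j hj => List.mem_range.mp (hsub.subset hj)
    have hub : pvMask n I < 2^n := by
      have := pvMask_lt n I hp hlt 0 (fun j _ => Nat.zero_le j)
      simpa using this
    have hne : I ≠ [] := by
      intro h; subst h; simp at hlen; omega
    have hlb : 1 ≤ pvMask n I := by
      obtain ⟨j, J, rfl⟩ := List.exists_cons_of_ne_nil hne
      have : (1:Nat) ≤ 2^(n-1-j) := Nat.one_le_two_pow
      simp [pvMask]
      omega
    exact ⟨hp, hlt, hlen, hlb, hub⟩
  have hpw : M.Pairwise (fun a b => key a < key b) := by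
    rw [hMdef, List.pairwise_flatMap]
    constructor
    · intro r hr
      rw [List.pairwise_map]
      have hrb := (PySem.List.mem_pyRange_one).mp hr
      have := pvComb_mask_pairwise n (List.range n) r.toNat List.pairwise_lt_range
        (fun j hj => List.mem_range.mp hj)
      apply this.imp_of_mem
      intro a b ha hb hab
      obtain ⟨hpa, hna, hla, h1a, h2a⟩ := hmem r hr a ha
      obtain ⟨hpb, hnb, hlb, h1b, h2b⟩ := hmem r hr b hb
      simp only [hkey, Int.toNat_natCast]
      rw [pvPopcount_mask n a hpa hna, pvPopcount_mask n b hpb hnb, hla, hlb]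
      have hm : ((pvMask n b : Int)) < (pvMask n a : Int) := by exact_mod_cast hab
      omega
    · have hrpw : (PySem.List.pyRange 1 ((n:Int)+1) 1).Pairwise (· < ·) :=
        PySem.List.pairwise_lt_pyRange_one 1 ((n:Int)+1)
      apply hrpw.imp_of_mem
      intro r r' hr hr' hrr x hx y hy
      obtain ⟨a, ha, rfl⟩ := List.mem_map.mp hx
      obtain ⟨b, hb, rfl⟩ := List.mem_map.mp hy
      obtain ⟨hpa, hna, hla, h1a, h2a⟩ := hmem r hr a ha
      obtain ⟨hpb, hnb, hlb, h1b, h2b⟩ := hmem r' hr' b hb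
      simp only [hkey, Int.toNat_natCast]
      rw [pvPopcount_mask n a hpa hna, pvPopcount_mask n b hpb hnb, hla, hlb]
      have hrb := (PySem.List.mem_pyRange_one).mp hr
      have hrb' := (PySem.List.mem_pyRange_one).mp hr'
      have hrt : r.toNat < r'.toNat := by omega
      have hP : (0:Int) ≤ (2:Int)^n := by positivity
      have hstep : ((r.toNat:Int)+1) * (2:Int)^n ≤ ((r'.toNat:Int)) * (2:Int)^n := by
        apply mul_le_mul_of_nonneg_right _ hP
        omega
      have h2b' : ((pvMask n b : Int)) < (2:Int)^n := by exact_mod_cast h2b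
      have h1a' : (1:Int) ≤ (pvMask n a : Int) := by exact_mod_cast h1a
      nlinarith [hstep]
  have hnd : M.Nodup := hpw.imp (fun h => fun he => by subst he; exact lt_irrefl _ h)
  have hsubs : M ⊆ PySem.List.pyRange 1 ((2:Int)^n) 1 := by
    intro x hx
    rw [hMdef, List.mem_flatMap] at hx
    obtain ⟨r, hr, hx⟩ := hx
    obtain ⟨I, hI, rfl⟩ := List.mem_map.mp hx
    obtain ⟨_, _, _, h1, h2⟩ := hmem r hr I hI
    rw [PySem.List.mem_pyRange_one]
    constructor
    · exact_mod_cast h1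
    · exact_mod_cast h2
  have hlenM : M.length = (PySem.List.pyRange 1 ((2:Int)^n) 1).length := by
    rw [hMdef, List.length_flatMap, PySem.List.length_pyRange_one, pvRange_eq_map, List.map_map]
    rw [List.map_congr_left (g := fun k => Nat.choose n (k+1)) ?hf]
    case hf =>
      intro k hk
      simp only [Function.comp_apply]
      rw [List.length_map, pvComb_length, List.length_range]
      congr 1
    rw [pvSum_range]
    have hch : ∑ i ∈ Finset.range n, Nat.choose n (i+1) = 2^n - 1 := by
      have h1 := Finset.sum_range_succ' (fun i => Nat.choose n i) n
      have h2 := Nat.sum_range_choose n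
      simp at h1
      omega
    rw [hch]
    have : ((2:Int)^n - 1).toNat = 2^n - 1 := by
      have : ((2:Int)^n) = ((2^n : Nat) : Int) := by push_cast; ring
      omega
    omega
  have hperm : M.Perm (PySem.List.pyRange 1 ((2:Int)^n) 1) :=
    (hnd.subperm hsubs).perm_of_length_le (le_of_eq hlenM.symm)
  exact PySem.List.sorted_eq_of_perm_of_pairwise_lt _ _ _ hperm hpw

theorem pvEnumerate_eq {α : Type} (a₀ : α) : ∀ (xs : List α) (s : Int),
    PySem.List.enumerate xs s = (List.range xs.length).map (fun (k:Nat) => (s + (k:Int), xs.getD k a₀)) := by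
  intro xs
  induction xs with
  | nil => intro s; rfl
  | cons x t ih =>
    intro s
    show (s, x) :: PySem.List.enumerate t (s+1) = _
    rw [ih (s+1)]
    rw [List.length_cons, List.range_succ_eq_map, List.map_cons, List.map_map]
    simp only [List.getD_cons_zero, Nat.cast_zero, add_zero]
    congr 1
    apply List.map_congr_left
    intro k hk
    simp only [Function.comp_apply, Nat.succ_eq_add_one, List.getD_cons_succ]
    congr 1
    push_cast
    ring

theorem pvStepA_fold_items (dd : PySem.Dict String String) (hnd : dd.keys.Nodup) :
    ∀ (sub : List String) (S : List String) (acc : PySem.Dict String String),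
      (∀ k ∈ sub, k ∈ dd.keys) →
      acc.items = dd.items.map (fun p => (p.1, if p.1 ∈ S then pvFlip p.2 else p.2)) →
      (∀ k ∈ sub, k ∉ S) → sub.Nodup →
      (sub.foldl (pvStepA dd) acc).items
        = dd.items.map (fun p => (p.1, if p.1 ∈ S ++ sub then pvFlip p.2 else p.2)) := by
  intro sub
  induction sub with
  | nil =>
    intro S acc _ hacc _ _
    simpa using hacc
  | cons k rest ih =>
    intro S acc hmem hacc hS hnds
    have hk : k ∈ dd.keys := hmem k (by simp)
    obtain ⟨v, hv⟩ : ∃ v, dd.get? k = some v := by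
      cases h : dd.get? k with
      | none => exact absurd ((PySem.Dict.get?_eq_none_iff_not_mem_keys dd k).mp h) (by simp [hk])
      | some v => exact ⟨v, rfl⟩
    have hgD : dd.getD k "" = v := PySem.Dict.getD_of_get?_eq_some dd "" hv
    have hkv : (k, v) ∈ dd.items := PySem.Dict.mem_items_of_get?_eq_some dd hv
    have hkeysacc : acc.keys = dd.keys := by
      show acc.items.map Prod.fst = dd.items.map Prod.fst
      rw [hacc, List.map_map]
      rfl
    have hcont : acc.contains k = true :=
      (PySem.Dict.contains_iff_mem_keys acc k).mpr (hkeysacc ▸ hk)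
    have hkS : k ∉ S := hS k (by simp)
    have hval : ∀ p ∈ dd.items, p.1 = k → p.2 = v := by
      intro p hp hpk
      obtain ⟨a, b⟩ := p
      simp only at hpk
      subst hpk
      have := PySem.Dict.get?_of_mem_items dd hp hnd
      rw [hv] at this
      exact (Option.some_inj.mp this).symm
    have hstep : (pvStepA dd acc k).items
        = dd.items.map (fun p => (p.1, if p.1 ∈ S ++ [k] then pvFlip p.2 else p.2)) := by
      unfold pvStepA
      rw [hgD]
      by_cases h1 : v = "1"
      · rw [if_pos (by simp [h1])]
        rw [PySem.Dict.items_insert_of_contains acc "0" hcont, hacc, List.map_map]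
        apply List.map_congr_left
        intro p hp
        by_cases hpk : p.1 = k
        · have hpv := hval p hp hpk
          simp [Function.comp, hpk, hpv, h1, pvFlip]
        · simp [Function.comp, hpk, List.mem_append]
      · by_cases h0 : v = "0"
        · rw [if_neg (by simp [h1]), if_pos (by simp [h0])]
          rw [PySem.Dict.items_insert_of_contains acc "1" hcont, hacc, List.map_map]
          apply List.map_congr_left
          intro p hp
          by_cases hpk : p.1 = k
          · have hpv := hval p hp hpk
            simp [Function.comp, hpk, hpv, h0, pvFlip]
          · simp [Function.comp, hpk, List.mem_append]
        · rw [if_neg (by simp [h1]), if_neg (by simp [h0]), hacc]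
          apply List.map_congr_left
          intro p hp
          by_cases hpk : p.1 = k
          · have hpv := hval p hp hpk
            simp [hpk, hpv, hkS, List.mem_append, pvFlip, h1, h0]
          · simp [hpk, List.mem_append]
    have hres := ih (S ++ [k]) (pvStepA dd acc k)
      (fun j hj => hmem j (by simp [hj]))
      hstep
      (by
        intro j hj hcon
        rcases List.mem_append.mp hcon with h | h
        · exact hS j (by simp [hj]) h
        · exact (List.nodup_cons.mp hnds).1 ((List.mem_singleton.mp h) ▸ hj))
      (List.nodup_cons.mp hnds).2
    rw [List.foldl_cons, hres]
    apply List.map_congr_left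
    intro p hp
    have : (p.1 ∈ S ++ [k] ++ rest) ↔ (p.1 ∈ S ++ k :: rest) := by
      simp [List.mem_append]
    simp only [this]

theorem pvVariantA_items (dd : PySem.Dict String String) (hnd : dd.keys.Nodup)
    (sub : List String) (hs : ∀ k ∈ sub, k ∈ dd.keys) (hnds : sub.Nodup) :
    (sub.foldl (pvStepA dd) dd).items
      = dd.items.map (fun p => (p.1, if p.1 ∈ sub then pvFlip p.2 else p.2)) := by
  have h := pvStepA_fold_items dd hnd sub [] dd hs (by simp) (by simp) hnds
  simpa using h

theorem pvKeys_len (dd : PySem.Dict String String) : dd.keys.length = dd.items.length :=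
  List.length_map _

theorem pvVariant_eq (dd : PySem.Dict String String) (hnd : dd.keys.Nodup) (I : List Nat)
    (hI : I.Pairwise (· < ·)) (hIn : ∀ j ∈ I, j < dd.items.length) :
    (PySem.List.enumerate dd.items 0).map (fun q =>
        (q.2.1, if ((pvMask dd.items.length I : Int).toNat >>> (dd.items.length - 1 - q.1.toNat)) &&& 1 == 1
          then pvFlip q.2.2 else q.2.2))
      = dd.items.map (fun p => (p.1, if p.1 ∈ I.map (fun i => dd.keys.getD i "") then pvFlip p.2 else p.2)) := by
  set n := dd.items.length with hn
  rw [pvEnumerate_eq ("","") dd.items 0, List.map_map]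
  apply List.ext_getElem
  · simp
  · intro i hi1 hi2
    rw [List.length_map, List.length_range] at hi1
    have hkl : dd.keys.length = n := pvKeys_len dd
    have hkey : dd.keys[i]'(by omega) = (dd.items[i]'(by omega)).1 := by
      show (dd.items.map Prod.fst)[i]'_ = _
      simp
    have hbit := pvMask_bit n I hI hIn i hi1
    have hmemiff : (dd.items[i]'(by omega)).1 ∈ I.map (fun j => dd.keys.getD j "") ↔ i ∈ I := by
      rw [List.mem_map]
      constructor
      · rintro ⟨j, hj, hje⟩
        have hjn : j < dd.keys.length := by have := hIn j hj; omega
        rw [List.getD_eq_getElem dd.keys "" hjn, ← hkey] at hje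
        have : j = i := by
          have := hnd.getElem_inj_iff.mp hje
          exact this
        exact this ▸ hj
      · intro hiI
        refine ⟨i, hiI, ?_⟩
        rw [List.getD_eq_getElem dd.keys "" (by omega), hkey]
    simp only [List.getElem_map, List.getElem_range, Function.comp_apply]
    rw [List.getD_eq_getElem dd.items ("","") hi1]
    have htoNat : ((0:Int) + (i:Nat)).toNat = i := by omega
    rw [htoNat, Int.toNat_natCast]
    by_cases hiI : i ∈ I
    · rw [if_pos (by rw [beq_iff_eq]; exact hbit.mpr hiI), if_pos (hmemiff.mpr hiI)]
    · rw [if_neg (by rw [beq_iff_eq]; exact fun h => hiI (hbit.mp h)), if_neg (fun h => hiI (hmemiff.mp h))]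

-- the port-A loop nest flattened (options collapsed, appends as flatMap)
theorem pvA_flat (dd : PySem.Dict String String) :
    ((PySem.List.pyRange 1 ((dd.keys.length : Int) + 1) 1).foldl (fun dv r =>
      (PySem.List.combinations dd.keys r.toNat).foldl (fun dv key_subset =>
        let new_dict_options :=
          key_subset.foldl (fun opts key =>
            if dd.getD key "" == "1" then
              opts.foldl (fun nv variant => nv ++ [variant.insert key "0"]) []
            else if dd.getD key "" == "0" then
              opts.foldl (fun nv variant => nv ++ [variant.insert key "1"]) []
            else opts) [dd]
        dv ++ new_dict_options) dv) [])
    = (PySem.List.pyRange 1 ((dd.keys.length : Int) + 1) 1).flatMap (fun r =>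
        (PySem.List.combinations dd.keys r.toNat).map (fun sub => sub.foldl (pvStepA dd) dd)) := by
  have hbody : (fun (dv : List (PySem.Dict String String)) (r : Int) =>
      (PySem.List.combinations dd.keys r.toNat).foldl (fun dv (key_subset : List String) =>
        dv ++ key_subset.foldl (fun opts key =>
            if dd.getD key "" == "1" then
              opts.foldl (fun nv variant => nv ++ [variant.insert key "0"]) []
            else if dd.getD key "" == "0" then
              opts.foldl (fun nv variant => nv ++ [variant.insert key "1"]) []
            else opts) [dd]) dv)
    = (fun dv r => dv ++ (PySem.List.combinations dd.keys r.toNat).map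
        (fun sub => sub.foldl (pvStepA dd) dd)) := by
    funext dv r
    have hopts : (fun (dv : List (PySem.Dict String String)) (key_subset : List String) =>
        dv ++ key_subset.foldl (fun opts key =>
            if dd.getD key "" == "1" then
              opts.foldl (fun nv variant => nv ++ [variant.insert key "0"]) []
            else if dd.getD key "" == "0" then
              opts.foldl (fun nv variant => nv ++ [variant.insert key "1"]) []
            else opts) [dd])
      = (fun dv (sub : List String) => dv ++ [sub.foldl (pvStepA dd) dd]) := by
      funext dv sub
      rw [pvOptions_singleton dd sub dd]
    rw [hopts, PySem.List.foldl_append_singleton_eq_map]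
  show ((PySem.List.pyRange 1 ((dd.keys.length : Int) + 1) 1).foldl (fun dv r =>
      (PySem.List.combinations dd.keys r.toNat).foldl (fun dv (key_subset : List String) =>
        dv ++ key_subset.foldl (fun opts key =>
            if dd.getD key "" == "1" then
              opts.foldl (fun nv variant => nv ++ [variant.insert key "0"]) []
            else if dd.getD key "" == "0" then
              opts.foldl (fun nv variant => nv ++ [variant.insert key "1"]) []
            else opts) [dd]) dv) []) = _
  rw [hbody, PySem.List.foldl_append_eq_flatMap]
  rfl

-- ===== VERDICT (by name: the statement is the Claim_ definition above) =====
theorem replace_dict_values_spec : Claim_equal_replace_dict_values := by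
  intro d mode _
  unfold Spec_replace_dict_values replace_dict_values replace_dict_values_alt
  simp only []
  set dd := PySem.Dict.ofList d with hdd
  have hnd : dd.keys.Nodup := PySem.Dict.nodup_keys_ofList d
  have hkl : dd.keys.length = dd.items.length := pvKeys_len dd
  set n := dd.items.length with hn
  set g : Nat → String := fun i => dd.keys.getD i "" with hg
  have hkeysdec : dd.keys = (List.range n).map g := by
    apply List.ext_getElem
    · simp [hkl]
    · intro i h1 h2
      rw [List.getElem_map, List.getElem_range]
      exact (List.getD_eq_getElem dd.keys "" h1).symm
  rw [pvA_flat dd, hkl]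
  rw [pvMasks_sorted n]
  rw [List.map_flatMap, List.map_flatMap]
  congr 1
  funext r
  rw [List.map_map, List.map_map]
  have hcomb : PySem.List.combinations dd.keys r.toNat
      = (PySem.List.combinations (List.range n) r.toNat).map (List.map g) := by
    conv_lhs => rw [hkeysdec]
    rw [PySem.List.combinations_map]
  rw [List.map_congr_left (g := fun sub =>
      dd.items.map (fun p => (p.1, if p.1 ∈ sub then pvFlip p.2 else p.2))) ?ha]
  case ha =>
    intro sub hsub
    simp only [Function.comp_apply]
    have hsl := PySem.List.sublist_of_mem_combinations hsub
    exact pvVariantA_items dd hnd sub (fun k hk => hsl.subset hk) (hnd.sublist hsl)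
  rw [hcomb, List.map_map]
  apply List.map_congr_left
  intro I hI
  simp only [Function.comp_apply]
  have hsl := PySem.List.sublist_of_mem_combinations hI
  have hIp : I.Pairwise (· < ·) := List.pairwise_lt_range.sublist hsl
  have hIn : ∀ j ∈ I, j < n := fun j hj => List.mem_range.mp (hsl.subset hj)
  exact (pvVariant_eq dd hnd I hIp hIn).symm
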